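-- pv_equiv track=rewrite | github.com/bellecode20/staedy | month_06/taeeun/경사로.py | check
-- ===== SOURCE A (Python) =====
-- def check(line, L):
--     N = len(line)
--     used = [False] * N
--     for i in range(N - 1):
--         diff = line[i + 1] - line[i]
--
--         if diff == 0:
--             continue
--         if abs(diff) > 1:
--             return False
--
--         if diff == -1:
--             h = line[i + 1]
--             for j in range(i + 1, i + 1 + L):
--                 if j >= N or line[j] != h or used[j]:
--                     return False
--                 used[j] = True
--
--         else:
--             h = line[i]
--             for j in range(i, i - L, -1):
--                 if j < 0 or line[j] != h or used[j]:
--                     return False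
--                 used[j] = True
--     return True
-- ===== SOURCE B (Python) =====
-- def check(line, L):
--     # One pass over adjacent pairs, tracking cnt = usable flat length of the
--     # current run minus pending downhill-ramp demand; no used[] array, no inner loops.
--     cnt = 1
--     for a, b in zip(line, line[1:]):
--         d = b - a
--         if d == 0:
--             cnt += 1
--         elif d == 1:
--             if cnt < L:
--                 return False
--             cnt = 1
--         elif d == -1:
--             if cnt < 0:
--                 return False
--             cnt = 1 - L
--         else:
--             return False
--     return cnt >= 0
-- ===== Notes on version B (the rewrite author's own statement) =====
-- stated objective: alternative
-- what changed: Replaces the used[] marker array and the per-slope inner ramp-marking loops (O(N*L) worst case) with a single pass over adjacent pairs that tracks one counter (current flat-run length minus pending downhill-ramp demand).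
import Mathlib
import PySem

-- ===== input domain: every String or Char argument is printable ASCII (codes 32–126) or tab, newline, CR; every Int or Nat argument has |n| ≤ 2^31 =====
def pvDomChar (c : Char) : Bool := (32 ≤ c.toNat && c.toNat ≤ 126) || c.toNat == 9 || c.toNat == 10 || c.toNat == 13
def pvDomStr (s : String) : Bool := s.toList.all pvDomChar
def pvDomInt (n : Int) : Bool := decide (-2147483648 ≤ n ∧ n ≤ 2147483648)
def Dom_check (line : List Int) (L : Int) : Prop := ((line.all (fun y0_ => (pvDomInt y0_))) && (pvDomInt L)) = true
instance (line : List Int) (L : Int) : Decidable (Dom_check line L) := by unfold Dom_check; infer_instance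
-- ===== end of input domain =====

-- B replaces A's used[] bookkeeping and its inner ramp-marking loops by a single pass over
-- adjacent pairs tracking one counter (flat-run length minus pending ramp demand): alternative algorithm.


-- ===== PORT A =====
def downMark (line : List Int) (hgt : Int) (used : List Bool) : List Int → Option (List Bool)
  | [] => some used
  | j :: js =>
      if PySem.List.len line ≤ j ∨ ¬ PySem.List.pyGetD line j 0 = hgt ∨ PySem.List.pyGetD used j false = true
      then none
      else downMark line hgt (PySem.List.pySetD used j true) js

def upMark (line : List Int) (hgt : Int) (used : List Bool) : List Int → Option (List Bool)
  | [] => some used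
  | j :: js =>
      if j < 0 ∨ ¬ PySem.List.pyGetD line j 0 = hgt ∨ PySem.List.pyGetD used j false = true
      then none
      else upMark line hgt (PySem.List.pySetD used j true) js

def checkGo (line : List Int) (L : Int) (used : List Bool) : List Int → Bool
  | [] => true
  | i :: is =>
      let diff := PySem.List.pyGetD line (i + 1) 0 - PySem.List.pyGetD line i 0
      if diff = 0 then checkGo line L used is
      else if 1 < |diff| then false
      else if diff = -1 then
        match downMark line (PySem.List.pyGetD line (i + 1) 0) used
            (PySem.List.pyRange (i + 1) (i + 1 + L) 1) with
        | none => false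
        | some u => checkGo line L u is
      else
        match upMark line (PySem.List.pyGetD line i 0) used
            (PySem.List.pyRange i (i - L) (-1)) with
        | none => false
        | some u => checkGo line L u is

def check (line : List Int) (L : Int) : Bool :=
  checkGo line L (List.replicate line.length false)
    (PySem.List.pyRange 0 (PySem.List.len line - 1) 1)

-- ===== PORT B =====
-- one pass over adjacent pairs; cnt = usable flat-run length minus pending downhill demand
def altGo (L : Int) (cnt : Int) : List Int → Bool
  | [] => decide (0 ≤ cnt)
  | [_] => decide (0 ≤ cnt)
  | a :: b :: rest =>
      let d := b - a
      if d = 0 then altGo L (cnt + 1) (b :: rest)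
      else if d = 1 then (if cnt < L then false else altGo L 1 (b :: rest))
      else if d = -1 then (if cnt < 0 then false else altGo L (1 - L) (b :: rest))
      else false

def check_alt (line : List Int) (L : Int) : Bool := altGo L 1 line




-- ===== PRECONDITION & SPEC =====
def Spec_check (line : List Int) (L : Int) (out : Bool) : Prop := out = check_alt line L
instance (line : List Int) (L : Int) (out : Bool) : Decidable (Spec_check line L out) := by unfold Spec_check; infer_instance

-- ===== CLAIM (what is proved, stated in full; the proofs are below) =====
def Claim_equal_check : Prop := ∀ (line : List Int) (L : Int), Dom_check line L → Spec_check line L (check line L)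

-- ===== LEMMAS AND PROOFS =====
-- length of the constant run with value h at the head of a list (proof-side helper for B)
def eqRun (h : Int) : List Int → Nat
  | [] => 0
  | x :: xs => if x = h then eqRun h xs + 1 else 0

lemma eqRun_spec (h : Int) (ys : List Int) :
    ∀ k : Nat, k < eqRun h ys → k < ys.length ∧ ys.getD k 0 = h := by
  induction ys with
  | nil => intro k hk; simp [eqRun] at hk
  | cons x xs ih =>
    intro k hk
    by_cases hx : x = h
    · simp only [eqRun, if_pos hx] at hk
      cases k with
      | zero => exact ⟨by simp, by simpa using hx⟩
      | succ k =>
        obtain ⟨h1, h2⟩ := ih k (by omega)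
        exact ⟨by simp; omega, by simpa using h2⟩
    · simp [eqRun, hx] at hk

lemma altGo_fail (L : Int) : ∀ (xs : List Int) (x : Int) (c : Int),
    c + (eqRun x (x :: xs) : Int) ≤ 0 → c + (eqRun x (x :: xs) : Int) ≤ L →
    altGo L c (x :: xs) = false := by
  intro xs
  induction xs with
  | nil =>
    intro x c h1 _
    simp [eqRun] at h1
    simp only [altGo, decide_eq_false_iff_not]
    omega
  | cons y xs ih =>
    intro x c h1 h2
    by_cases hyx : y = x
    · subst hyx
      simp [eqRun] at h1 h2
      simp only [altGo]
      rw [if_pos (by omega : y - y = 0)]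
      have := ih y (c + 1)
      simp [eqRun] at this
      apply this <;> push_cast at h1 h2 ⊢ <;> omega
    · have he : eqRun x (x :: y :: xs) = 1 := by
        simp [eqRun, hyx]
      rw [he] at h1 h2
      push_cast at h1 h2
      simp only [altGo]
      rw [if_neg (show ¬ y - x = 0 by intro hc; exact hyx (by omega))]
      by_cases hd1 : y - x = 1
      · rw [if_pos hd1, if_pos (show c < L by omega)]
      · rw [if_neg hd1]
        by_cases hdm : y - x = -1
        · rw [if_pos hdm, if_pos (show c < 0 by omega)]
        · rw [if_neg hdm]


lemma getD_set_true (U : List Bool) (n m : Nat) (h : U.getD m false = true) :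
    (U.set n true).getD m false = true := by
  rcases eq_or_ne n m with rfl | hne
  · by_cases hlt : n < U.length
    · simp [List.getD, List.getElem?_set_self, hlt]
    · rw [List.set_eq_of_length_le (by omega)]; exact h
  · simpa [List.getD, List.getElem?_set_ne hne] using h

lemma getD_set_ne (U : List Bool) (v : Bool) (n m : Nat) (h : n ≠ m) :
    (U.set n v).getD m false = U.getD m false := by
  simp [List.getD, List.getElem?_set_ne h]

lemma getD_set_self (U : List Bool) (v : Bool) (n : Nat) (h : n < U.length) :
    (U.set n v).getD n false = v := by
  simp [List.getD, List.getElem?_set_self, h]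

lemma downMark_fail (line : List Int) (hgt : Int) :
    ∀ (js : List Int) (U : List Bool),
    (∃ j ∈ js, (line.length : Int) ≤ j ∨ ¬ PySem.List.pyGetD line j 0 = hgt) →
    downMark line hgt U js = none := by
  intro js
  induction js with
  | nil => rintro U ⟨j, hj, _⟩; simp at hj
  | cons j0 js ih =>
    rintro U ⟨j, hj, hcond⟩
    rw [List.mem_cons] at hj
    simp only [downMark]
    rcases hj with rfl | hj
    · rw [if_pos]
      simp only [PySem.List.len_eq]
      tauto
    · split_ifs with hC
      · rfl
      · exact ih _ ⟨j, hj, hcond⟩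

lemma upMark_fail (line : List Int) (hgt : Int) :
    ∀ (js : List Int) (U : List Bool),
    (∃ j ∈ js, j < 0 ∨ ¬ PySem.List.pyGetD line j 0 = hgt ∨ PySem.List.pyGetD U j false = true) →
    upMark line hgt U js = none := by
  intro js
  induction js with
  | nil => rintro U ⟨j, hj, _⟩; simp at hj
  | cons j0 js ih =>
    rintro U ⟨j, hj, hcond⟩
    rw [List.mem_cons] at hj
    simp only [upMark]
    rcases hj with rfl | hj
    · rw [if_pos hcond]
    · split_ifs with hC
      · rfl
      · push_neg at hC
        obtain ⟨hC1, hC2, hC3⟩ := hC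
        refine ih _ ⟨j, hj, ?_⟩
        rcases hcond with h | h | h
        · exact Or.inl h
        · exact Or.inr (Or.inl h)
        · -- monotonicity of marking
          rcases lt_or_ge j 0 with hneg | hpos
          · exact Or.inl hneg
          · right; right
            rw [PySem.List.pySetD_of_nonneg _ _ (by omega : (0:Int) ≤ j0)]
            rw [PySem.List.pyGetD_of_nonneg _ _ hpos] at h ⊢
            exact getD_set_true _ _ _ h

lemma downMark_success (line : List Int) (hgt : Int) :
    ∀ (js : List Int) (U : List Bool),
    U.length = line.length →
    js.Nodup →
    (∀ j ∈ js, 0 ≤ j ∧ j < (line.length : Int) ∧ PySem.List.pyGetD line j 0 = hgt ∧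
        U.getD j.toNat false = false) →
    ∃ U', downMark line hgt U js = some U' ∧ U'.length = U.length ∧
      ∀ k : Nat, (U'.getD k false = true ↔ ((k : Int) ∈ js ∨ U.getD k false = true)) := by
  intro js
  induction js with
  | nil =>
    intro U _ _ _
    exact ⟨U, rfl, rfl, fun k => by simp⟩
  | cons j0 js ih =>
    intro U hUlen hnd hall
    obtain ⟨h0, hlt, hline, hU0⟩ := hall j0 (List.mem_cons_self)
    have hgetU : PySem.List.pyGetD U j0 false = false := by
      rw [PySem.List.pyGetD_of_nonneg _ _ h0]; exact hU0
    have hC : ¬ (PySem.List.len line ≤ j0 ∨ ¬ PySem.List.pyGetD line j0 0 = hgt ∨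
        PySem.List.pyGetD U j0 false = true) := by
      simp only [PySem.List.len_eq]
      push_neg
      exact ⟨by omega, hline, by simp [hgetU]⟩
    have hset : PySem.List.pySetD U j0 true = U.set j0.toNat true :=
      PySem.List.pySetD_of_nonneg _ _ h0
    have hlen2 : (U.set j0.toNat true).length = line.length := by simp [hUlen]
    have htail : ∀ j ∈ js, 0 ≤ j ∧ j < (line.length : Int) ∧ PySem.List.pyGetD line j 0 = hgt ∧
        (U.set j0.toNat true).getD j.toNat false = false := by
      intro j hj
      obtain ⟨a1, a2, a3, a4⟩ := hall j (List.mem_cons_of_mem _ hj)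
      refine ⟨a1, a2, a3, ?_⟩
      have hne : j0.toNat ≠ j.toNat := by
        have : j0 ≠ j := by rintro rfl; exact (List.nodup_cons.mp hnd).1 hj
        omega
      rw [getD_set_ne _ _ _ _ hne]
      exact a4
    obtain ⟨U', he, hlen', hchar⟩ := ih (U.set j0.toNat true) hlen2 hnd.of_cons htail
    refine ⟨U', ?_, by simp [hlen', hUlen, hlen2], ?_⟩
    · simp only [downMark, if_neg hC, hset]; exact he
    · intro k
      rw [hchar k]
      rcases eq_or_ne (k : Int) j0 with hk | hk
      · have hkn : j0.toNat = k := by omega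
        constructor
        · intro _; exact Or.inl (by simp [hk])
        · intro _
          right
          rw [← hkn, getD_set_self _ _ _ (by rw [hUlen]; omega)]
      · have hkn : j0.toNat ≠ k := by omega
        rw [getD_set_ne _ _ _ _ hkn]
        simp only [List.mem_cons]
        tauto

lemma upMark_success (line : List Int) (hgt : Int) :
    ∀ (js : List Int) (U : List Bool),
    U.length = line.length →
    js.Nodup →
    (∀ j ∈ js, 0 ≤ j ∧ j < (line.length : Int) ∧ PySem.List.pyGetD line j 0 = hgt ∧
        U.getD j.toNat false = false) →
    ∃ U', upMark line hgt U js = some U' ∧ U'.length = U.length ∧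
      ∀ k : Nat, (U'.getD k false = true ↔ ((k : Int) ∈ js ∨ U.getD k false = true)) := by
  intro js
  induction js with
  | nil =>
    intro U _ _ _
    exact ⟨U, rfl, rfl, fun k => by simp⟩
  | cons j0 js ih =>
    intro U hUlen hnd hall
    obtain ⟨h0, hlt, hline, hU0⟩ := hall j0 (List.mem_cons_self)
    have hgetU : PySem.List.pyGetD U j0 false = false := by
      rw [PySem.List.pyGetD_of_nonneg _ _ h0]; exact hU0
    have hC : ¬ (j0 < 0 ∨ ¬ PySem.List.pyGetD line j0 0 = hgt ∨
        PySem.List.pyGetD U j0 false = true) := by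
      push_neg
      exact ⟨by omega, hline, by simp [hgetU]⟩
    have hset : PySem.List.pySetD U j0 true = U.set j0.toNat true :=
      PySem.List.pySetD_of_nonneg _ _ h0
    have hlen2 : (U.set j0.toNat true).length = line.length := by simp [hUlen]
    have htail : ∀ j ∈ js, 0 ≤ j ∧ j < (line.length : Int) ∧ PySem.List.pyGetD line j 0 = hgt ∧
        (U.set j0.toNat true).getD j.toNat false = false := by
      intro j hj
      obtain ⟨a1, a2, a3, a4⟩ := hall j (List.mem_cons_of_mem _ hj)
      refine ⟨a1, a2, a3, ?_⟩
      have hne : j0.toNat ≠ j.toNat := by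
        have : j0 ≠ j := by rintro rfl; exact (List.nodup_cons.mp hnd).1 hj
        omega
      rw [getD_set_ne _ _ _ _ hne]
      exact a4
    obtain ⟨U', he, hlen', hchar⟩ := ih (U.set j0.toNat true) hlen2 hnd.of_cons htail
    refine ⟨U', ?_, by simp [hlen', hUlen, hlen2], ?_⟩
    · simp only [upMark, if_neg hC, hset]; exact he
    · intro k
      rw [hchar k]
      rcases eq_or_ne (k : Int) j0 with hk | hk
      · have hkn : j0.toNat = k := by omega
        constructor
        · intro _; exact Or.inl (by simp [hk])
        · intro _
          right
          rw [← hkn, getD_set_self _ _ _ (by rw [hUlen]; omega)]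
      · have hkn : j0.toNat ≠ k := by omega
        rw [getD_set_ne _ _ _ _ hkn]
        simp only [List.mem_cons]
        tauto
-- small structural lemmas
lemma altGo_cons2 (L cnt a b : Int) (rest : List Int) :
    altGo L cnt (a :: b :: rest) =
      (if b - a = 0 then altGo L (cnt + 1) (b :: rest)
       else if b - a = 1 then (if cnt < L then false else altGo L 1 (b :: rest))
       else if b - a = -1 then (if cnt < 0 then false else altGo L (1 - L) (b :: rest))
       else false) := by
  simp only [altGo]

lemma checkGo_cons (line : List Int) (L : Int) (U : List Bool) (i : Int) (is : List Int) :
    checkGo line L U (i :: is) =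
      (if PySem.List.pyGetD line (i+1) 0 - PySem.List.pyGetD line i 0 = 0 then checkGo line L U is
       else if 1 < |PySem.List.pyGetD line (i+1) 0 - PySem.List.pyGetD line i 0| then false
       else if PySem.List.pyGetD line (i+1) 0 - PySem.List.pyGetD line i 0 = -1 then
         (match downMark line (PySem.List.pyGetD line (i+1) 0) U (PySem.List.pyRange (i+1) (i+1+L) 1) with
          | none => false
          | some u => checkGo line L u is)
       else
         (match upMark line (PySem.List.pyGetD line i 0) U (PySem.List.pyRange i (i-L) (-1)) with
          | none => false
          | some u => checkGo line L u is)) := by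
  simp only [checkGo]

lemma drop_cons_getD (l : List Int) (i : Nat) (h : i < l.length) :
    l.drop i = l.getD i 0 :: l.drop (i + 1) := by
  rw [List.getD_eq_getElem _ _ h]
  exact List.drop_eq_getElem_cons h

lemma getD_drop (l : List Int) (m k : Nat) (h : m + k < l.length) :
    (l.drop m).getD k 0 = l.getD (m + k) 0 := by
  rw [List.getD_eq_getElem _ _ (by rw [List.length_drop]; omega),
      List.getD_eq_getElem _ _ h]
  simp [List.getElem_drop]
lemma endCase (line : List Int) (L : Int) (i s em : Nat) (dm : Int) (U : List Bool)
    (hsi : s ≤ i) (hiN : i < line.length) (hend : ¬ i + 1 < line.length)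
    (hmrun : ∀ j : Nat, s ≤ j → j < s + em → line.getD j 0 = line.getD s 0 ∧ j < line.length)
    (hdm : (dm = L ∧ em = L.toNat) ∨ (dm = 0 ∧ em = 0)) :
    checkGo line L U (PySem.List.pyRange (i : Int) ((line.length : Int) - 1) 1)
      = altGo L ((i : Int) - s + 1 - dm) (line.drop i) := by
  rw [show PySem.List.pyRange (i : Int) ((line.length : Int) - 1) 1 = [] from
    PySem.List.pyRange_one_eq_nil (by omega)]
  have hdrop : line.drop i = [line.getD i 0] := by
    rw [drop_cons_getD line i hiN, List.drop_eq_nil_of_le (by omega)]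
  rw [hdrop]
  have hem : s + em ≤ i + 1 := by
    by_contra hc
    push_neg at hc
    have := (hmrun (s + em - 1) (by omega) (by omega)).2
    omega
  have hcnt : (0:Int) ≤ (i : Int) - s + 1 - dm := by
    rcases hdm with ⟨rfl, rfl⟩ | ⟨rfl, rfl⟩ <;> omega
  simp [checkGo, altGo]
  omega

lemma mainInv (line : List Int) (L : Int) :
    ∀ (d : Nat) (i s em : Nat) (dm : Int) (U : List Bool),
    line.length - 1 - i ≤ d →
    U.length = line.length →
    s ≤ i → i < line.length →
    (∀ j : Nat, s ≤ j → j ≤ i → line.getD j 0 = line.getD s 0) →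
    (0 < s → line.getD (s - 1) 0 ≠ line.getD s 0) →
    (∀ j : Nat, s ≤ j → (U.getD j false = true ↔ j < s + em)) →
    (∀ j : Nat, s ≤ j → j < s + em → line.getD j 0 = line.getD s 0 ∧ j < line.length) →
    ((dm = L ∧ em = L.toNat) ∨ (dm = 0 ∧ em = 0)) →
    checkGo line L U (PySem.List.pyRange (i : Int) ((line.length : Int) - 1) 1)
      = altGo L ((i : Int) - s + 1 - dm) (line.drop i) := by
  intro d
  induction d with
  | zero =>
    intro i s em dm U hd hUlen hsi hiN hrun hprev hmarks hmrun hdm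
    exact endCase line L i s em dm U hsi hiN (by omega) hmrun hdm
  | succ d ih =>
    intro i s em dm U hd hUlen hsi hiN hrun hprev hmarks hmrun hdm
    by_cases hcont : i + 1 < line.length
    case neg => exact endCase line L i s em dm U hsi hiN hcont hmrun hdm
    rw [show PySem.List.pyRange (i : Int) ((line.length : Int) - 1) 1
        = (i : Int) :: PySem.List.pyRange ((i : Int) + 1) ((line.length : Int) - 1) 1 from
      PySem.List.pyRange_one_cons (by omega)]
    have e2 : PySem.List.pyGetD line (i:Int) 0 = line.getD i 0 := by simp
    have e1 : PySem.List.pyGetD line ((i:Int) + 1) 0 = line.getD (i+1) 0 := by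
      rw [show ((i:Int) + 1) = ((i+1 : Nat) : Int) by push_cast; ring,
        PySem.List.pyGetD_natCast]
    have hdropi1 : line.drop (i+1) = line.getD (i+1) 0 :: line.drop (i + 2) :=
      drop_cons_getD line (i+1) hcont
    have hdropi : line.drop i = line.getD i 0 :: line.getD (i+1) 0 :: line.drop (i + 2) := by
      rw [drop_cons_getD line i hiN, hdropi1]
    have has : line.getD i 0 = line.getD s 0 := hrun i hsi le_rfl
    rw [checkGo_cons, e1, e2, hdropi, altGo_cons2]
    have hc1 : (((i+1:Nat)):Int) = (i:Int)+1 := by push_cast; ring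
    by_cases h0 : line.getD (i+1) 0 - line.getD i 0 = 0
    · -- flat step
      rw [if_pos h0, if_pos h0]
      have hrun' : ∀ j : Nat, s ≤ j → j ≤ i + 1 → line.getD j 0 = line.getD s 0 := by
        intro j hj1 hj2
        rcases Nat.lt_or_ge j (i+1) with h | h
        · exact hrun j hj1 (by omega)
        · have hje : j = i + 1 := by omega
          subst hje
          rw [show line.getD (i+1) 0 = line.getD i 0 by omega, has]
      have hIH := ih (i+1) s em dm U (by omega) hUlen (by omega) hcont hrun' hprev hmarks hmrun hdm
      rw [hc1] at hIH
      rw [hdropi1] at hIH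
      rw [hIH]
      congr 1
      push_cast
      ring
    · rw [if_neg h0, if_neg h0]
      by_cases habs : 1 < |line.getD (i+1) 0 - line.getD i 0|
      · -- impossible slope: both fail
        have hn1 : ¬ line.getD (i+1) 0 - line.getD i 0 = 1 := by
          intro hc; rw [hc] at habs; norm_num at habs
        have hnm1 : ¬ line.getD (i+1) 0 - line.getD i 0 = -1 := by
          intro hc; rw [hc] at habs; norm_num at habs
        rw [if_pos habs, if_neg hn1, if_neg hnm1]
      · have habs' : |line.getD (i+1) 0 - line.getD i 0| ≤ 1 := by omega
        rw [abs_le] at habs'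
        rw [if_neg habs]
        have hrunstep : ∀ j : Nat, i + 1 ≤ j → j ≤ i + 1 → line.getD j 0 = line.getD (i+1) 0 := by
          intro j h1 h2
          have : j = i + 1 := by omega
          rw [this]
        have hprevstep : 0 < i + 1 → line.getD (i+1-1) 0 ≠ line.getD (i+1) 0 := by
          intro _
          rw [show i + 1 - 1 = i by omega]
          omega
        by_cases hdn : line.getD (i+1) 0 - line.getD i 0 = -1
        · -- DOWNHILL step
          rw [if_pos hdn, if_neg (by omega : ¬ line.getD (i+1) 0 - line.getD i 0 = 1),
              if_pos hdn]
          have hsem : s + em ≤ i + 1 := by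
            by_contra hc
            push_neg at hc
            have h2 := (hmrun (i+1) (by omega) (by omega)).1
            omega
          have hcnt0 : ¬ ((i:Int) - s + 1 - dm < 0) := by
            rcases hdm with ⟨rfl, rfl⟩ | ⟨rfl, rfl⟩ <;> omega
          rw [if_neg hcnt0]
          by_cases hC : ∀ j : Int, (i:Int)+1 ≤ j → j < (i:Int)+1+L →
              j < (line.length : Int) ∧ line.getD j.toNat 0 = line.getD (i+1) 0
          · -- ramp placement succeeds
            have hall : ∀ j ∈ PySem.List.pyRange ((i:Int)+1) ((i:Int)+1+L) 1,
                0 ≤ j ∧ j < (line.length : Int) ∧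
                PySem.List.pyGetD line j 0 = line.getD (i+1) 0 ∧
                U.getD j.toNat false = false := by
              intro j hj
              rw [PySem.List.mem_pyRange_one] at hj
              obtain ⟨hj1, hj2⟩ := hj
              obtain ⟨hjN, hjv⟩ := hC j hj1 hj2
              refine ⟨by omega, hjN, ?_, ?_⟩
              · rw [PySem.List.pyGetD_of_nonneg _ _ (by omega : (0:Int) ≤ j)]
                exact hjv
              · have hs : s ≤ j.toNat := by omega
                exact Bool.eq_false_iff.mpr
                  (fun hh => by have := (hmarks _ hs).mp hh; omega)
            obtain ⟨U', hU'eq, hU'len, hU'c⟩ :=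
              downMark_success line (line.getD (i+1) 0)
                (PySem.List.pyRange ((i:Int)+1) ((i:Int)+1+L) 1) U hUlen
                (PySem.List.nodup_pyRange_one _ _) hall
            simp only [hU'eq]
            have hmarks' : ∀ j : Nat, i + 1 ≤ j →
                (U'.getD j false = true ↔ j < (i + 1) + L.toNat) := by
              intro j hj
              rw [hU'c j, PySem.List.mem_pyRange_one]
              constructor
              · rintro (⟨hh1, hh2⟩ | hU)
                · omega
                · have := (hmarks j (by omega)).mp hU; omega
              · intro hh
                exact Or.inl ⟨by omega, by omega⟩
            have hmrun' : ∀ j : Nat, i + 1 ≤ j → j < (i + 1) + L.toNat →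
                line.getD j 0 = line.getD (i+1) 0 ∧ j < line.length := by
              intro j hj1 hj2
              have hjj := hC (j:Int) (by omega) (by omega)
              rw [Int.toNat_natCast] at hjj
              exact ⟨hjj.2, by omega⟩
            have hIH := ih (i+1) (i+1) L.toNat L U' (by omega)
              (by rw [hU'len, hUlen]) le_rfl hcont hrunstep hprevstep
              hmarks' hmrun' (Or.inl ⟨rfl, rfl⟩)
            rw [hc1] at hIH
            rw [hdropi1] at hIH
            rw [hIH]
            congr 1
            push_cast
            ring
          · -- ramp placement fails: A fails now, B fails later inside the run
            push_neg at hC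
            obtain ⟨j, hj1, hj2, hjbad⟩ := hC
            have hLpos : 0 < L := by omega
            have hcond : (line.length : Int) ≤ j ∨ ¬ PySem.List.pyGetD line j 0 = line.getD (i+1) 0 := by
              by_cases hjN : j < (line.length : Int)
              · right
                rw [PySem.List.pyGetD_of_nonneg _ _ (by omega : (0:Int) ≤ j)]
                exact hjbad hjN
              · left; omega
            have hfail := downMark_fail line (line.getD (i+1) 0)
                (PySem.List.pyRange ((i:Int)+1) ((i:Int)+1+L) 1) U
                ⟨j, by rw [PySem.List.mem_pyRange_one]; exact ⟨hj1, hj2⟩, hcond⟩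
            simp only [hfail]
            have hnlt : (eqRun (line.getD (i+1) 0) (line.getD (i+1) 0 :: line.drop (i+2)) : Int) < L := by
              by_contra hge
              push_neg at hge
              have hk : (j - ((i:Int)+1)).toNat <
                  eqRun (line.getD (i+1) 0) (line.getD (i+1) 0 :: line.drop (i+2)) := by omega
              obtain ⟨hklen, hkval⟩ := eqRun_spec (line.getD (i+1) 0) _ _ hk
              rw [← hdropi1] at hklen hkval
              rw [List.length_drop] at hklen
              by_cases hjN : j < (line.length : Int)
              · rw [getD_drop line (i+1) _ (by omega)] at hkval
                rw [show (i+1) + (j - ((i:Int)+1)).toNat = j.toNat by omega] at hkval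
                exact (hjbad hjN) hkval
              · omega
            exact (altGo_fail L _ _ (1 - L) (by omega) (by omega)).symm
        · -- UPHILL step
          have hd1 : line.getD (i+1) 0 - line.getD i 0 = 1 := by omega
          rw [if_neg hdn, if_pos hd1]
          have hsem : s + em ≤ i + 1 := by
            by_contra hc
            push_neg at hc
            have h2 := (hmrun (i+1) (by omega) (by omega)).1
            omega
          have hIff : ((s:Int) + em ≤ (i:Int) - L + 1) ↔ ¬ ((i:Int) - s + 1 - dm < L) := by
            rcases hdm with ⟨rfl, rfl⟩ | ⟨rfl, rfl⟩ <;> constructor <;> intro <;> omega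
          by_cases hCu : (s:Int) + em ≤ (i:Int) - L + 1
          · -- ramp placement succeeds
            have hnd : (PySem.List.pyRange (i:Int) ((i:Int)-L) (-1)).Nodup := by
              rw [PySem.List.pyRange_neg_one_eq_reverse]
              exact List.nodup_reverse.mpr (PySem.List.nodup_pyRange_one _ _)
            have hall : ∀ j ∈ PySem.List.pyRange (i:Int) ((i:Int)-L) (-1),
                0 ≤ j ∧ j < (line.length : Int) ∧
                PySem.List.pyGetD line j 0 = line.getD i 0 ∧
                U.getD j.toNat false = false := by
              intro j hj
              rw [PySem.List.mem_pyRange_neg_one] at hj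
              obtain ⟨hj1, hj2⟩ := hj
              refine ⟨by omega, by omega, ?_, ?_⟩
              · rw [PySem.List.pyGetD_of_nonneg _ _ (by omega : (0:Int) ≤ j)]
                rw [hrun j.toNat (by omega) (by omega), ← has]
              · exact Bool.eq_false_iff.mpr
                  (fun hh => by have := (hmarks _ (by omega : s ≤ j.toNat)).mp hh; omega)
            obtain ⟨U', hU'eq, hU'len, hU'c⟩ :=
              upMark_success line (line.getD i 0)
                (PySem.List.pyRange (i:Int) ((i:Int)-L) (-1)) U hUlen hnd hall
            simp only [hU'eq]
            rw [if_neg (hIff.mp hCu)]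
            have hmarks' : ∀ j : Nat, i + 1 ≤ j →
                (U'.getD j false = true ↔ j < (i + 1) + 0) := by
              intro j hj
              rw [hU'c j, PySem.List.mem_pyRange_neg_one]
              constructor
              · rintro (⟨hh1, hh2⟩ | hU)
                · exact absurd hh2 (by omega)
                · have := (hmarks j (by omega)).mp hU
                  exact absurd this (by omega)
              · intro hh
                exact absurd hh (by omega)
            have hmrun' : ∀ j : Nat, i + 1 ≤ j → j < (i + 1) + 0 →
                line.getD j 0 = line.getD (i+1) 0 ∧ j < line.length := by
              intro j h1 h2
              exact absurd h2 (by omega)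
            have hIH := ih (i+1) (i+1) 0 0 U' (by omega)
              (by rw [hU'len, hUlen]) le_rfl hcont hrunstep hprevstep
              hmarks' hmrun' (Or.inr ⟨rfl, rfl⟩)
            rw [hc1] at hIH
            rw [hdropi1] at hIH
            rw [hIH]
            congr 1
            push_cast
            ring
          · -- ramp placement fails; B fails the counter check
            have hwit : ∃ j ∈ PySem.List.pyRange (i:Int) ((i:Int)-L) (-1),
                j < 0 ∨ ¬ PySem.List.pyGetD line j 0 = line.getD i 0 ∨
                PySem.List.pyGetD U j false = true := by
              push_neg at hCu
              rcases Nat.eq_zero_or_pos em with hem0 | hempos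
              · rcases Nat.eq_zero_or_pos s with hs0 | hspos
                · refine ⟨-1, ?_, Or.inl (by norm_num)⟩
                  rw [PySem.List.mem_pyRange_neg_one]
                  omega
                · refine ⟨((s:Int) - 1), ?_, Or.inr (Or.inl ?_)⟩
                  · rw [PySem.List.mem_pyRange_neg_one]
                    omega
                  · rw [PySem.List.pyGetD_of_nonneg _ _ (by omega : (0:Int) ≤ (s:Int) - 1)]
                    rw [show ((s:Int) - 1).toNat = s - 1 by omega]
                    intro hcv
                    exact hprev hspos (hcv.trans has)
              · refine ⟨((s:Int) + em - 1), ?_, Or.inr (Or.inr ?_)⟩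
                · rw [PySem.List.mem_pyRange_neg_one]
                  omega
                · rw [PySem.List.pyGetD_of_nonneg _ _ (by omega : (0:Int) ≤ (s:Int) + em - 1)]
                  rw [show ((s:Int) + em - 1).toNat = s + em - 1 by omega]
                  exact (hmarks (s+em-1) (by omega)).mpr (by omega)
            have hfail := upMark_fail line (line.getD i 0)
                (PySem.List.pyRange (i:Int) ((i:Int)-L) (-1)) U hwit
            simp only [hfail]
            rw [if_pos (show (i:Int)-s+1-dm < L by
              by_contra hc; exact hCu (hIff.mpr hc))]

theorem check_eq_alt (line : List Int) (L : Int) : check line L = check_alt line L := by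
  unfold check check_alt
  rcases Nat.eq_zero_or_pos line.length with hN | hN
  · have : line = [] := List.length_eq_zero_iff.mp hN
    subst this
    simp [checkGo, altGo, PySem.List.pyRange_one_eq_nil]
  · have h := mainInv line L line.length 0 0 0 0 (List.replicate line.length false)
      (by omega) (by simp) (le_refl 0) hN
      (fun j h1 h2 => congrArg (fun k => line.getD k 0) (by omega : j = 0))
      (by intro h; omega)
      (by intro j _
          simp [List.getD, List.getElem?_replicate]
          split <;> simp)
      (by intro j _ hj; exact absurd hj (by omega))
      (Or.inr ⟨rfl, rfl⟩)
    rw [PySem.List.len_eq]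
    rw [show ((0:Nat):Int) = (0:Int) by norm_num] at h
    rw [List.drop_zero] at h
    rw [h]
    norm_num

-- ===== VERDICT (by name: the statement is the Claim_ definition above) =====
theorem check_spec : Claim_equal_check := by
  intro line L _
  unfold Spec_check
  exact check_eq_alt line L
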